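-- pv_equiv track=rewrite | github.com/lizyshare/agent_meeting | meeting/introduction.py | split_by_time_interval
-- ===== SOURCE A (Python) =====
-- def split_by_time_interval(entries: list, interval_minutes: int) -> list:
--     """按时间间隔分割条目"""
--     if not entries:
--         return []
--
--     segments = []
--     current_segment = [entries[0]]
--     start_time = entries[0][0]  # 起始时间(总秒数)
--     interval_seconds = interval_minutes * 60  # 转换为秒
--
--     for entry in entries[1:]:
--         time_diff = entry[0] - start_time
--         if time_diff >= interval_seconds:
--             segments.append(current_segment)
--             current_segment = [entry]
--             start_time = entry[0]
--         else:
--             current_segment.append(entry)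
--
--     if current_segment:
--         segments.append(current_segment)
--     return segments
-- ===== SOURCE B (Python) =====
-- def split_by_time_interval(entries: list, interval_minutes: int) -> list:
--     """按时间间隔分割条目 — recursive decomposition: peel off the first segment, recurse on the rest."""
--     if not entries:
--         return []
--     interval_seconds = interval_minutes * 60
--     start_time = entries[0][0]
--     i = 1
--     while i < len(entries) and entries[i][0] - start_time < interval_seconds:
--         i += 1
--     return [entries[:i]] + split_by_time_interval(entries[i:], interval_minutes)
-- ===== Notes on version B (the rewrite author's own statement) =====
-- stated objective: alternative
-- what changed: Replaces A's single accumulator loop (segments/current_segment/start_time state machine with a final flush) by a recursive decomposition: scan for the end of the first segment, slice it off, and recurse on the remainder.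
import Mathlib
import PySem

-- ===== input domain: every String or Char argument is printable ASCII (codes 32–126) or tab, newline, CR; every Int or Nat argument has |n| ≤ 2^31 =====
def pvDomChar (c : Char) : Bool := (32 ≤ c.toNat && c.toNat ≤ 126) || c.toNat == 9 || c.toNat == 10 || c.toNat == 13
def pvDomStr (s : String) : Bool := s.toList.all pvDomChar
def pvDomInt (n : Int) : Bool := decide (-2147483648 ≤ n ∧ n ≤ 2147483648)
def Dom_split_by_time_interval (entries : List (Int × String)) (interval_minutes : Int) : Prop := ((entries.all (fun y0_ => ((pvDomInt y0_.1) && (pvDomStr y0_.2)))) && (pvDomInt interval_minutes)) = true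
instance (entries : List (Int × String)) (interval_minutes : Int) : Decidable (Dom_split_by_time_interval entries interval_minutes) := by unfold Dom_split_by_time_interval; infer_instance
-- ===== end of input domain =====

-- B replaces A's accumulator state machine by a recursive peel-off-first-segment decomposition; objective: alternative.


-- ===== PORT A =====
-- literal transliteration: foldl over entries[1:] carrying (segments, current_segment, start_time), final flush
def split_by_time_interval (entries : List (Int × String)) (interval_minutes : Int) : List (List (Int × String)) :=
  match entries with
  | [] => []
  | e0 :: rest =>
    let interval_seconds := interval_minutes * 60
    let st := rest.foldl
      (fun (s : List (List (Int × String)) × List (Int × String) × Int) entry =>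
        if entry.1 - s.2.2 ≥ interval_seconds then (s.1 ++ [s.2.1], [entry], entry.1)
        else (s.1, s.2.1 ++ [entry], s.2.2))
      ([], [e0], e0.1)
    if st.2.1 ≠ [] then st.1 ++ [st.2.1] else st.1

-- ===== PORT B =====
-- B's while loop 'i = 1; while i < len and entries[i][0] - start < iv: i += 1' counts the tail of the first segment
def pvFirstLen (iv st : Int) : List (Int × String) → Nat
  | [] => 0
  | e :: rest => if e.1 - st < iv then pvFirstLen iv st rest + 1 else 0

def split_by_time_interval_alt (entries : List (Int × String)) (interval_minutes : Int) : List (List (Int × String)) :=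
  match entries with
  | [] => []
  | e0 :: rest =>
    let interval_seconds := interval_minutes * 60
    let k := pvFirstLen interval_seconds e0.1 rest   -- entries[:i] = e0 :: rest.take k, entries[i:] = rest.drop k
    (e0 :: rest.take k) :: split_by_time_interval_alt (rest.drop k) interval_minutes
termination_by entries.length
decreasing_by simp

-- ===== PRECONDITION & SPEC =====
def Spec_split_by_time_interval (entries : List (Int × String)) (interval_minutes : Int) (out : List (List (Int × String))) : Prop := out = split_by_time_interval_alt entries interval_minutes
instance (entries : List (Int × String)) (interval_minutes : Int) (out : List (List (Int × String))) : Decidable (Spec_split_by_time_interval entries interval_minutes out) := by unfold Spec_split_by_time_interval; infer_instance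

-- ===== CLAIM (what is proved, stated in full; the proofs are below) =====
def Claim_equal_split_by_time_interval : Prop := ∀ (entries : List (Int × String)) (interval_minutes : Int), Dom_split_by_time_interval entries interval_minutes → Spec_split_by_time_interval entries interval_minutes (split_by_time_interval entries interval_minutes)

-- ===== LEMMAS AND PROOFS =====

-- proof-only bridge: A's loop continued from state (cur, st), with the final flush, as a recursion
def pvGo (iv st : Int) (acc : List (Int × String)) : List (Int × String) → List (List (Int × String))
  | [] => [acc]
  | e :: rest => if e.1 - st ≥ iv then acc :: pvGo iv e.1 [e] rest else pvGo iv st (acc ++ [e]) rest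

theorem pvA_eq_go (iv : Int) (l : List (Int × String)) :
    ∀ (segs : List (List (Int × String))) (acc : List (Int × String)) (st : Int), acc ≠ [] →
    (let r := l.foldl
      (fun (s : List (List (Int × String)) × List (Int × String) × Int) entry =>
        if entry.1 - s.2.2 ≥ iv then (s.1 ++ [s.2.1], [entry], entry.1)
        else (s.1, s.2.1 ++ [entry], s.2.2)) (segs, acc, st)
     ; if r.2.1 ≠ [] then r.1 ++ [r.2.1] else r.1) = segs ++ pvGo iv st acc l := by
  induction l with
  | nil => intro segs acc st hacc; simp [pvGo, hacc]
  | cons e l ih =>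
    intro segs acc st hacc
    simp only [List.foldl_cons, pvGo]
    by_cases h : e.1 - st ≥ iv
    · simp only [h, if_pos]
      rw [ih (segs ++ [acc]) [e] e.1 (by simp)]
      simp
    · simp only [h, if_false]
      rw [ih segs (acc ++ [e]) st (by simp)]

theorem pvGo_eq_alt (iv : Int) (im : Int) (hiv : iv = im * 60) (l : List (Int × String)) :
    ∀ (acc : List (Int × String)) (st : Int),
    pvGo iv st acc l =
      (acc ++ l.take (pvFirstLen iv st l)) ::
        split_by_time_interval_alt (l.drop (pvFirstLen iv st l)) im := by
  induction l with
  | nil => intro acc st; simp [pvGo, pvFirstLen, split_by_time_interval_alt.eq_def]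
  | cons e l ih =>
    intro acc st
    by_cases h : e.1 - st < iv
    · have h' : ¬ (e.1 - st ≥ iv) := by omega
      simp only [pvGo, pvFirstLen, h, if_pos, h', if_false]
      rw [ih (acc ++ [e]) st]
      simp
    · have h' : e.1 - st ≥ iv := by omega
      simp only [pvGo, pvFirstLen, h, h', if_pos, if_false]
      rw [ih [e] e.1]
      simp only [List.append_nil, List.take_zero, List.drop_zero]
      conv_rhs => rw [split_by_time_interval_alt.eq_def]
      simp [hiv]

-- ===== VERDICT (by name: the statement is the Claim_ definition above) =====
theorem split_by_time_interval_spec : Claim_equal_split_by_time_interval := by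
  intro entries im _
  unfold Spec_split_by_time_interval
  match entries with
  | [] => simp [split_by_time_interval, split_by_time_interval_alt.eq_def]
  | e0 :: rest =>
    show (let st := rest.foldl _ ([], [e0], e0.1); if st.2.1 ≠ [] then st.1 ++ [st.2.1] else st.1) = _
    rw [pvA_eq_go (im * 60) rest [] [e0] e0.1 (by simp)]
    rw [pvGo_eq_alt (im * 60) im rfl rest [e0] e0.1]
    conv_rhs => rw [split_by_time_interval_alt.eq_def]
    simp
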